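-- pv_equiv track=rewrite | github.com/thinger-io/plugins | build_docs.py | generate_main_nav_section
-- ===== SOURCE A (Python) =====
-- CATEGORY_ORDER = ["devices", "connectivity", "monitoring", "development", "infrastructure", "templates"]
--
-- CATEGORY_NAMES = {
--     "connectivity": "Connectivity",
--     "devices": "Devices",
--     "monitoring": "Monitoring",
--     "development": "Development",
--     "infrastructure": "Infrastructure",
--     "templates": "Templates",
-- }
--
-- def generate_main_nav_section(categories_data: dict) -> str:
--     """Generate the Integrations section for the main mkdocs.yml nav, with category index pages."""
--     lines = []
--
--     # Generate nav with category index + plugins (flatter structure)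
--     for category in CATEGORY_ORDER:
--         if category in categories_data:
--             category_display = CATEGORY_NAMES.get(category, category.title())
--             lines.append(f"      - {category_display}:")
--             lines.append(f"        - Overview: 'plugins/{category}/index.md'")
--             for display_name, plugin_name, _, _, _ in categories_data[category]:
--                 lines.append(f"        - {display_name}: '!include ./_build/plugins/{category}/{plugin_name}/mkdocs.yml'")
--
--     # Handle any categories not in CATEGORY_ORDER
--     for category in sorted(categories_data.keys()):
--         if category not in CATEGORY_ORDER:
--             category_display = CATEGORY_NAMES.get(category, category.title())
--             lines.append(f"      - {category_display}:")
--             lines.append(f"        - Overview: 'plugins/{category}/index.md'")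
--             for display_name, plugin_name, _, _, _ in categories_data[category]:
--                 lines.append(f"        - {display_name}: '!include ./_build/plugins/{category}/{plugin_name}/mkdocs.yml'")
--
--     return "\n".join(lines)
-- ===== SOURCE B (Python) =====
-- CATEGORY_ORDER = ["devices", "connectivity", "monitoring", "development", "infrastructure", "templates"]
--
-- CATEGORY_NAMES = {
--     "connectivity": "Connectivity",
--     "devices": "Devices",
--     "monitoring": "Monitoring",
--     "development": "Development",
--     "infrastructure": "Infrastructure",
--     "templates": "Templates",
-- }
--
-- def generate_main_nav_section(categories_data: dict) -> str:
--     """Generate the Integrations section for the main mkdocs.yml nav, with category index pages."""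
--     rank = {c: i for i, c in enumerate(CATEGORY_ORDER)}
--     lines = []
--     # One composite-key sort replaces the two staged passes: categories with a
--     # CATEGORY_ORDER rank come first in rank order, the rest (rank = len) alphabetically.
--     for category in sorted(categories_data, key=lambda c: (rank.get(c, len(CATEGORY_ORDER)), c)):
--         display = CATEGORY_NAMES.get(category, category.title())
--         lines.append(f"      - {display}:")
--         lines.append(f"        - Overview: 'plugins/{category}/index.md'")
--         for display_name, plugin_name, _, _, _ in categories_data[category]:
--             lines.append(f"        - {display_name}: '!include ./_build/plugins/{category}/{plugin_name}/mkdocs.yml'")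
--     return "\n".join(lines)
-- ===== Notes on version B (the rewrite author's own statement) =====
-- stated objective: alternative
-- what changed: A's two staged emission passes (scan CATEGORY_ORDER for present keys, then a second pass over the sorted leftover keys) are replaced by one sort of all category keys under the composite key (rank in CATEGORY_ORDER or len(CATEGORY_ORDER), name) followed by a single emission loop.
import Mathlib
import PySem

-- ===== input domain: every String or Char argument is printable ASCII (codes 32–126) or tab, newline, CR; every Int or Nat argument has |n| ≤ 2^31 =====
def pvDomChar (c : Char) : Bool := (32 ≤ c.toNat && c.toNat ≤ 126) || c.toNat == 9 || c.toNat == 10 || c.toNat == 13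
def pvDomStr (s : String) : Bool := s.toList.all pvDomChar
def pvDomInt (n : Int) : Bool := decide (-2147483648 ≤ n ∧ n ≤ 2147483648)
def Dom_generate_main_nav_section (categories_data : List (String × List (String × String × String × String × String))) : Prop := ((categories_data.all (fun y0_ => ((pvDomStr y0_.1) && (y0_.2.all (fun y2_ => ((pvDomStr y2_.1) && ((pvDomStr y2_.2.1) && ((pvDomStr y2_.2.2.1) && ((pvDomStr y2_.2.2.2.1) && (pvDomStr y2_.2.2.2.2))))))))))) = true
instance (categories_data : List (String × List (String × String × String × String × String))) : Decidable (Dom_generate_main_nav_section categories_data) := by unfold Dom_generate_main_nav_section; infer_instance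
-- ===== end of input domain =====

-- B replaces A's two staged emission passes (CATEGORY_ORDER scan, then sorted leftovers)
-- by ONE sort of all category keys under the composite key (rank-in-CATEGORY_ORDER, name)
-- followed by a single emission loop (objective: alternative).

-- shared module-level constants of the Python module
def CATEGORY_ORDER : List String :=
  ["devices", "connectivity", "monitoring", "development", "infrastructure", "templates"]

def CATEGORY_NAMES : PySem.Dict String String :=
  PySem.Dict.ofList
    [("connectivity", "Connectivity"), ("devices", "Devices"), ("monitoring", "Monitoring"),
     ("development", "Development"), ("infrastructure", "Infrastructure"), ("templates", "Templates")]

-- str.title(), ported by hand character by character; exact on the ASCII domain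
-- (cased characters = ASCII letters there): a letter is uppercased after a non-letter,
-- lowercased after a letter.
def asciiUp (c : Char) : Char :=
  if 'a' ≤ c ∧ c ≤ 'z' then Char.ofNat (c.toNat - 32) else c

def asciiDown (c : Char) : Char :=
  if 'A' ≤ c ∧ c ≤ 'Z' then Char.ofNat (c.toNat + 32) else c

def isAsciiAlpha (c : Char) : Bool :=
  ('a' ≤ c && c ≤ 'z') || ('A' ≤ c && c ≤ 'Z')

def titleChars : List Char → Bool → List Char
  | [], _ => []
  | c :: rest, prevAlpha =>
      if isAsciiAlpha c then
        (if prevAlpha then asciiDown c else asciiUp c) :: titleChars rest true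
      else
        c :: titleChars rest false

def pyTitle (s : String) : String := String.ofList (titleChars s.toList false)

-- categories_data[category] (first match; in both Pythons it is only evaluated for keys
-- that are present, so the default is never reached)
def lookupCat (categories_data : List (String × List (String × String × String × String × String)))
    (category : String) : List (String × String × String × String × String) :=
  ((categories_data.find? (fun p => p.1 == category)).map Prod.snd).getD []

-- ===== PORT A =====
def generate_main_nav_section (categories_data : List (String × List (String × String × String × String × String))) : String :=
  let lines : List String := []
  -- first loop: categories of CATEGORY_ORDER present in the dict
  let lines := CATEGORY_ORDER.foldl
    (fun lines category =>
      if (categories_data.map Prod.fst).contains category then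
        let category_display := CATEGORY_NAMES.getD category (pyTitle category)
        let lines := lines ++ ["      - " ++ category_display ++ ":"]
        let lines := lines ++ ["        - Overview: 'plugins/" ++ category ++ "/index.md'"]
        (lookupCat categories_data category).foldl
          (fun lines t =>
            lines ++ ["        - " ++ t.1 ++ ": '!include ./_build/plugins/" ++ category ++ "/" ++ t.2.1 ++ "/mkdocs.yml'"])
          lines
      else lines)
    lines
  -- second loop: remaining categories, in sorted key order
  let lines := (PySem.List.sorted (categories_data.map Prod.fst) (fun x => x) false).foldl
    (fun lines category =>
      if ¬ CATEGORY_ORDER.contains category then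
        let category_display := CATEGORY_NAMES.getD category (pyTitle category)
        let lines := lines ++ ["      - " ++ category_display ++ ":"]
        let lines := lines ++ ["        - Overview: 'plugins/" ++ category ++ "/index.md'"]
        (lookupCat categories_data category).foldl
          (fun lines t =>
            lines ++ ["        - " ++ t.1 ++ ": '!include ./_build/plugins/" ++ category ++ "/" ++ t.2.1 ++ "/mkdocs.yml'"])
          lines
      else lines)
    lines
  PySem.Str.join "\n" lines

-- ===== PORT B =====
-- rank = {c: i for i, c in enumerate(CATEGORY_ORDER)}
def RANK : PySem.Dict String Int :=
  PySem.Dict.ofList ((PySem.List.enumerate CATEGORY_ORDER).map (fun p => (p.2, p.1)))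

def generate_main_nav_section_alt (categories_data : List (String × List (String × String × String × String × String))) : String :=
  let lines : List String := []
  -- single loop over sorted(categories_data, key=lambda c: (rank.get(c, len(CATEGORY_ORDER)), c))
  let lines := (PySem.List.sorted2 (categories_data.map Prod.fst)
      (fun c => RANK.getD c (CATEGORY_ORDER.length : Int)) (fun c => c) false).foldl
    (fun lines category =>
      let display := CATEGORY_NAMES.getD category (pyTitle category)
      let lines := lines ++ ["      - " ++ display ++ ":"]
      let lines := lines ++ ["        - Overview: 'plugins/" ++ category ++ "/index.md'"]
      (lookupCat categories_data category).foldl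
        (fun lines t =>
          lines ++ ["        - " ++ t.1 ++ ": '!include ./_build/plugins/" ++ category ++ "/" ++ t.2.1 ++ "/mkdocs.yml'"])
        lines)
    lines
  PySem.Str.join "\n" lines

-- ===== PRECONDITION & SPEC =====
-- Pre_ requires distinct category keys: the Python argument is a dict, whose
-- association-list encoding cannot carry a duplicate key.
def Pre_generate_main_nav_section (categories_data : List (String × List (String × String × String × String × String))) : Prop :=
  (categories_data.map Prod.fst).Nodup
instance (categories_data : List (String × List (String × String × String × String × String))) : Decidable (Pre_generate_main_nav_section categories_data) := by unfold Pre_generate_main_nav_section; infer_instance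

def pvWitness_generate_main_nav_section : (List (String × List (String × String × String × String × String))) :=
  [("zeta plugins", [("My Plugin", "my-plugin", "x", "y", "z")]), ("devices", [("Dev A", "dev-a", "", "", "")])]

def Spec_generate_main_nav_section (categories_data : List (String × List (String × String × String × String × String))) (out : String) : Prop := out = generate_main_nav_section_alt categories_data
instance (categories_data : List (String × List (String × String × String × String × String))) (out : String) : Decidable (Spec_generate_main_nav_section categories_data out) := by unfold Spec_generate_main_nav_section; infer_instance

-- ===== CLAIM (what is proved, stated in full; the proofs are below) =====
def Claim_equal_generate_main_nav_section : Prop := ∀ (categories_data : List (String × List (String × String × String × String × String))), Dom_generate_main_nav_section categories_data → Pre_generate_main_nav_section categories_data → Spec_generate_main_nav_section categories_data (generate_main_nav_section categories_data)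

-- ===== LEMMAS AND PROOFS =====

-- the lines of one category (proof-side abbreviation shared by both sides)
def category_block (categories_data : List (String × List (String × String × String × String × String)))
    (category : String) : List String :=
  ["      - " ++ CATEGORY_NAMES.getD category (pyTitle category) ++ ":",
   "        - Overview: 'plugins/" ++ category ++ "/index.md'"]
  ++ (lookupCat categories_data category).map
      (fun t => "        - " ++ t.1 ++ ": '!include ./_build/plugins/" ++ category ++ "/" ++ t.2.1 ++ "/mkdocs.yml'")

-- each per-category body (header, overview, inner plugin loop) appends exactly category_block
theorem body_eq_block (cd : List (String × List (String × String × String × String × String)))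
    (category : String) (acc : List String) :
    ((lookupCat cd category).foldl
        (fun lines t =>
          lines ++ ["        - " ++ t.1 ++ ": '!include ./_build/plugins/" ++ category ++ "/" ++ t.2.1 ++ "/mkdocs.yml'"])
        ((acc ++ ["      - " ++ CATEGORY_NAMES.getD category (pyTitle category) ++ ":"])
          ++ ["        - Overview: 'plugins/" ++ category ++ "/index.md'"]))
      = acc ++ category_block cd category := by
  rw [PySem.List.foldl_append_singleton_eq_map]
  simp [category_block]

-- a Python sort under the tuple key (k1, k2) is a sort under the lexicographic order
theorem sorted2_eq_sorted_lex {α : Type} (xs : List α) (k1 : α → Int) (k2 : α → String) :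
    PySem.List.sorted2 xs k1 k2 false = PySem.List.sorted xs (fun x => toLex (k1 x, k2 x)) false := by
  have hf : (fun (x y : α) => decide (k1 x < k1 y) || (!decide (k1 y < k1 x) && decide (k2 x < k2 y)))
      = (fun (x y : α) => decide (toLex (k1 x, k2 x) < toLex (k1 y, k2 y))) := by
    funext x y
    rcases lt_trichotomy (k1 x) (k1 y) with h | h | h
    · simp [Prod.Lex.lt_iff, h, asymm h]
    · simp [Prod.Lex.lt_iff, h]
    · simp [Prod.Lex.lt_iff, asymm h, ne_of_gt h]
      intro hle; exact absurd (lt_of_lt_of_le h hle) (lt_irrefl _)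
  unfold PySem.List.sorted2 PySem.List.sorted
  simp only [if_neg (Bool.false_ne_true), hf]

-- the rank key: len(CATEGORY_ORDER) for keys outside CATEGORY_ORDER, < that bound inside
theorem rank_of_not_mem (c : String) (hc : c ∉ CATEGORY_ORDER) :
    RANK.getD c (CATEGORY_ORDER.length : Int) = 6 := by
  have hkeys : RANK.keys = CATEGORY_ORDER := by decide
  have hcon : RANK.contains c = false := by
    rw [PySem.Dict.contains_eq_decide_mem_keys, hkeys]
    exact decide_eq_false hc
  rw [PySem.Dict.getD_of_not_contains RANK _ hcon]
  decide

theorem rank_lt_of_mem (c : String) (hc : c ∈ CATEGORY_ORDER) :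
    RANK.getD c (CATEGORY_ORDER.length : Int) < 6 := by
  fin_cases hc <;> decide

-- filtering a sorted list is sorting the filtered list (identity key)
theorem filter_sorted (keys : List String) (p : String → Bool) :
    (PySem.List.sorted keys (fun x => x) false).filter p
      = PySem.List.sorted (keys.filter p) (fun x => x) false := by
  exact (PySem.List.sorted_id_eq_of_perm_of_pairwise _ _
    ((PySem.List.sorted_perm keys (fun x => x) false).filter p)
    ((PySem.List.sorted_pairwise keys (fun x => x)).filter p)).symm

-- under distinct keys, the composite-key sort IS "order part, then sorted leftovers"
theorem sorted2_keys (keys : List String) (h : keys.Nodup) :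
    PySem.List.sorted2 keys (fun c => RANK.getD c (CATEGORY_ORDER.length : Int)) (fun c => c) false
      = CATEGORY_ORDER.filter (fun c => keys.contains c)
        ++ PySem.List.sorted (keys.filter (fun c => !CATEGORY_ORDER.contains c)) (fun x => x) false := by
  rw [sorted2_eq_sorted_lex]
  apply PySem.List.sorted_eq_of_perm_of_pairwise_lt
  · -- permutation of keys
    have h1 : (CATEGORY_ORDER.filter (fun c => keys.contains c)).Perm
        (keys.filter (fun c => CATEGORY_ORDER.contains c)) := by
      rw [List.perm_ext_iff_of_nodup
        ((by decide : CATEGORY_ORDER.Nodup).filter _) (h.filter _)]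
      intro a
      simp [List.mem_filter, and_comm]
    have h2 : (PySem.List.sorted (keys.filter (fun c => !CATEGORY_ORDER.contains c)) (fun x => x) false).Perm
        (keys.filter (fun c => !CATEGORY_ORDER.contains c)) := PySem.List.sorted_perm _ _ _
    exact (h1.append h2).trans (List.filter_append_perm _ keys)
  · -- strictly lex-increasing
    rw [List.pairwise_append]
    refine ⟨?_, ?_, ?_⟩
    · have hORD : CATEGORY_ORDER.Pairwise
          (fun a b => RANK.getD a (CATEGORY_ORDER.length : Int) < RANK.getD b (CATEGORY_ORDER.length : Int)) := by
        decide
      exact (List.Pairwise.sublist List.filter_sublist hORD).imp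
        (fun hab => Prod.Lex.lt_iff.mpr (Or.inl hab))
    · have hnd : (PySem.List.sorted (keys.filter (fun c => !CATEGORY_ORDER.contains c)) (fun x => x) false).Nodup :=
        (PySem.List.sorted_perm _ _ _).nodup_iff.mpr (h.filter _)
      have hle := PySem.List.sorted_pairwise (keys.filter (fun c => !CATEGORY_ORDER.contains c)) (fun x => x)
      refine (hle.and hnd).imp_of_mem ?_
      intro a b ha hb hab
      have ha6 : RANK.getD a (CATEGORY_ORDER.length : Int) = 6 := by
        apply rank_of_not_mem
        have := ((PySem.List.mem_sorted _ _ _ _).mp ha)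
        simp [List.mem_filter] at this
        exact this.2
      have hb6 : RANK.getD b (CATEGORY_ORDER.length : Int) = 6 := by
        apply rank_of_not_mem
        have := ((PySem.List.mem_sorted _ _ _ _).mp hb)
        simp [List.mem_filter] at this
        exact this.2
      exact Prod.Lex.lt_iff.mpr (Or.inr ⟨ha6.trans hb6.symm, lt_of_le_of_ne hab.1 hab.2⟩)
    · intro a ha b hb
      have ha' : a ∈ CATEGORY_ORDER := (List.mem_filter.mp ha).1
      have hb6 : RANK.getD b (CATEGORY_ORDER.length : Int) = 6 := by
        apply rank_of_not_mem
        have := ((PySem.List.mem_sorted _ _ _ _).mp hb)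
        simp [List.mem_filter] at this
        exact this.2
      exact Prod.Lex.lt_iff.mpr (Or.inl (by rw [hb6]; exact rank_lt_of_mem a ha'))

-- ===== VERDICT (by name: the statement is the Claim_ definition above) =====
theorem generate_main_nav_section_spec : Claim_equal_generate_main_nav_section := by
  intro cd _ hpre
  show _ = _
  unfold generate_main_nav_section generate_main_nav_section_alt
  simp only
  congr 1
  -- A side: both loops are appends of category blocks over filtered key lists
  have e1 : (fun (lines : List String) category =>
      if (cd.map Prod.fst).contains category then
        (lookupCat cd category).foldl
          (fun lines t =>
            lines ++ ["        - " ++ t.1 ++ ": '!include ./_build/plugins/" ++ category ++ "/" ++ t.2.1 ++ "/mkdocs.yml'"])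
          ((lines ++ ["      - " ++ CATEGORY_NAMES.getD category (pyTitle category) ++ ":"])
            ++ ["        - Overview: 'plugins/" ++ category ++ "/index.md'"])
      else lines)
      = fun (lines : List String) category =>
          if (cd.map Prod.fst).contains category then lines ++ category_block cd category else lines := by
    funext lines c
    by_cases h : (cd.map Prod.fst).contains c = true
    · simp only [h, if_true]; exact body_eq_block cd c lines
    · rw [if_neg h, if_neg h]
  have e2 : (fun (lines : List String) category =>
      if ¬ CATEGORY_ORDER.contains category then
        (lookupCat cd category).foldl
          (fun lines t =>
            lines ++ ["        - " ++ t.1 ++ ": '!include ./_build/plugins/" ++ category ++ "/" ++ t.2.1 ++ "/mkdocs.yml'"])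
          ((lines ++ ["      - " ++ CATEGORY_NAMES.getD category (pyTitle category) ++ ":"])
            ++ ["        - Overview: 'plugins/" ++ category ++ "/index.md'"])
      else lines)
      = fun (lines : List String) category =>
          if !CATEGORY_ORDER.contains category then lines ++ category_block cd category else lines := by
    funext lines c
    by_cases h : CATEGORY_ORDER.contains c = true
    · have hm : c ∈ CATEGORY_ORDER := by simpa using h
      rw [if_neg (not_not_intro h), if_neg (by simp [hm])]
    · have hm : c ∉ CATEGORY_ORDER := by simpa using h
      rw [if_pos h, if_pos (by simp [hm])]
      exact body_eq_block cd c lines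
  -- B side: one loop of block appends over the composite-key-sorted keys
  have e3 : (fun (lines : List String) category =>
      (lookupCat cd category).foldl
        (fun lines t =>
          lines ++ ["        - " ++ t.1 ++ ": '!include ./_build/plugins/" ++ category ++ "/" ++ t.2.1 ++ "/mkdocs.yml'"])
        ((lines ++ ["      - " ++ CATEGORY_NAMES.getD category (pyTitle category) ++ ":"])
          ++ ["        - Overview: 'plugins/" ++ category ++ "/index.md'"]))
      = fun (lines : List String) category => lines ++ category_block cd category := by
    funext lines c
    exact body_eq_block cd c lines
  rw [e1, e2, e3, PySem.List.foldl_if_eq_foldl_filter, PySem.List.foldl_if_eq_foldl_filter,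
    PySem.List.foldl_append_eq_flatMap, PySem.List.foldl_append_eq_flatMap,
    PySem.List.foldl_append_eq_flatMap, List.nil_append, List.nil_append,
    filter_sorted, sorted2_keys (cd.map Prod.fst) hpre, List.flatMap_append]
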